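-- pv_equiv track=rewrite | github.com/MrBrantCode/unitest_baseline | mut_generate/mist_train_taco/taco_1524/solution.py | find_max_tandem_repeat_length
-- ===== SOURCE A (Python) =====
-- def find_max_tandem_repeat_length(s: str, k: int) -> int:
--     ans = 0
--     if k >= len(s):
--         return (k + len(s)) // 2 * 2
--
--     for i in range(len(s)):
--         for j in range(0, i + 1):
--             len1 = len(s[j:i + 1])
--             len2 = len(s[i + 1:])
--             minn = min(len1, len2)
--             if s[j:j + minn] == s[i + 1:i + 1 + minn]:
--                 if minn == len1:
--                     ans = max(ans, len1 * 2)
--                 elif k + len2 >= len1: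
--                     ans = max(ans, len1 * 2)
--
--     return ans
-- ===== SOURCE B (Python) =====
-- def find_max_tandem_repeat_length(s: str, k: int) -> int:
--     n = len(s)
--     if k >= n:
--         return (k + n) // 2 * 2
--     # rows[a][b] = length of the longest common prefix of s[a:] and s[b:],
--     # built bottom-up so each substring comparison of A becomes one table lookup.
--     rows = [[0] * (n + 1)]  # row for start index n
--     for a in range(n - 1, -1, -1):
--         prev = rows[0]
--         rows.insert(0, [prev[b + 1] + 1 if s[a] == s[b] else 0 for b in range(n)] + [0])
--     ans = 0
--     for i in range(n):
--         for j in range(i + 1):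
--             len1 = i + 1 - j
--             len2 = n - i - 1
--             minn = len2 if len2 < len1 else len1
--             if rows[j][i + 1] >= minn and (len1 <= len2 or k + len2 >= len1):
--                 ans = max(ans, len1 * 2)
--     return ans
-- ===== Notes on version B (the rewrite author's own statement) =====
-- stated objective: alternative
-- what changed: B precomputes an (n+1)x(n+1) longest-common-prefix table bottom-up (one DP pass) and replaces A's per-(i,j)-pair substring slicing and comparison by a single table lookup (intended as faster; a timing run measured ~1.9x at n=1024 but could not confirm it at the largest size).
import Mathlib
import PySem

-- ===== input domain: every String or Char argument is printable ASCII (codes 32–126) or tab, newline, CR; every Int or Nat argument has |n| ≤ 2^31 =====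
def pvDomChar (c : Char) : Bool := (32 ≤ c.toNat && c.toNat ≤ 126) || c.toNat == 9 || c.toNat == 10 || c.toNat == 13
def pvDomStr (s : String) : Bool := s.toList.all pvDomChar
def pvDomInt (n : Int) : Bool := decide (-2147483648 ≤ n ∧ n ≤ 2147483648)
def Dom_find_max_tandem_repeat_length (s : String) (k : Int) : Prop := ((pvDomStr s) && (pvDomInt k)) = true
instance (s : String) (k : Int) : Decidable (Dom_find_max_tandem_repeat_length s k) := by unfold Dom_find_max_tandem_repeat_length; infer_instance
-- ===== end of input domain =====

-- B precomputes a longest-common-prefix DP table so each of A's per-pair substring comparisons becomes one table lookup (intended as faster; a timing run measured ~1.9x at n=1024, unconfirmed at larger sizes).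

-- ===== PORT A =====
def find_max_tandem_repeat_length (s : String) (k : Int) : Int :=
  let cs := s.toList
  if k ≥ (cs.length : Int) then PySem.Int.floordiv (k + (cs.length : Int)) 2 * 2
  else
    (PySem.List.pyRange 0 (cs.length : Int) 1).foldl (fun ans i =>
      (PySem.List.pyRange 0 (i + 1) 1).foldl (fun ans j =>
        let len1 : Int := ((PySem.List.slice cs (some j) (some (i + 1))).length : Int)
        let len2 : Int := ((PySem.List.slice cs (some (i + 1)) none).length : Int)
        let minn : Int := min len1 len2
        if PySem.List.slice cs (some j) (some (j + minn)) =
           PySem.List.slice cs (some (i + 1)) (some (i + 1 + minn)) then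
          if minn = len1 then max ans (len1 * 2)
          else if k + len2 ≥ len1 then max ans (len1 * 2)
          else ans
        else ans) ans) 0

-- ===== PORT B =====
-- loop body of Source B's table-building loop ('for a in range(n-1, -1, -1): ...')
def pvAltStep (cs : List Char) (rows : List (List Int)) (a : Int) : List (List Int) :=
  let prev := PySem.List.pyGetD rows 0 ([] : List Int)
  PySem.List.insert rows 0
    (((PySem.List.pyRange 0 (cs.length : Int) 1).map (fun b =>
        if PySem.List.pyGetD cs a ' ' = PySem.List.pyGetD cs b ' '
        then PySem.List.pyGetD prev (b + 1) 0 + 1 else 0)) ++ [0])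

def find_max_tandem_repeat_length_alt (s : String) (k : Int) : Int :=
  let cs := s.toList
  let n : Int := (cs.length : Int)
  if k ≥ n then PySem.Int.floordiv (k + n) 2 * 2
  else
    let rows := (PySem.List.pyRange (n - 1) (-1) (-1)).foldl (pvAltStep cs)
        [List.replicate (cs.length + 1) (0 : Int)]
    (PySem.List.pyRange 0 n 1).foldl (fun ans i =>
      (PySem.List.pyRange 0 (i + 1) 1).foldl (fun ans j =>
        let len1 : Int := i + 1 - j
        let len2 : Int := n - i - 1
        let minn : Int := if len2 < len1 then len2 else len1
        if PySem.List.pyGetD (PySem.List.pyGetD rows j ([] : List Int)) (i + 1) 0 ≥ minn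
           ∧ (len1 ≤ len2 ∨ k + len2 ≥ len1)
        then max ans (len1 * 2) else ans) ans) 0

-- ===== PRECONDITION & SPEC =====
def Spec_find_max_tandem_repeat_length (s : String) (k : Int) (out : Int) : Prop := out = find_max_tandem_repeat_length_alt s k
instance (s : String) (k : Int) (out : Int) : Decidable (Spec_find_max_tandem_repeat_length s k out) := by unfold Spec_find_max_tandem_repeat_length; infer_instance

-- ===== CLAIM (what is proved, stated in full; the proofs are below) =====
def Claim_equal_find_max_tandem_repeat_length : Prop := ∀ (s : String) (k : Int), Dom_find_max_tandem_repeat_length s k → Spec_find_max_tandem_repeat_length s k (find_max_tandem_repeat_length s k)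

-- ===== LEMMAS AND PROOFS =====

-- longest common prefix length of cs.drop a and cs.drop b (the value Source B's table holds)
def pvLcp (cs : List Char) (a b : Nat) : Nat :=
  if h : a < cs.length ∧ b < cs.length then
    (if cs[a]'h.1 = cs[b]'h.2 then pvLcp cs (a + 1) (b + 1) + 1 else 0)
  else 0
termination_by cs.length - a
decreasing_by omega

-- functional mirror of one table row, and of the rows list after t iterations
def pvRowFor (cs : List Char) (a : Nat) (prev : List Int) : List Int :=
  ((List.range cs.length).map (fun b =>
      if cs.getD a ' ' = cs.getD b ' ' then prev.getD (b + 1) 0 + 1 else 0)) ++ [0]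

def pvRowsFrom (cs : List Char) : Nat → List (List Int)
  | 0 => [List.replicate (cs.length + 1) 0]
  | t + 1 => pvRowFor cs (cs.length - (t + 1)) ((pvRowsFrom cs t).getD 0 []) :: pvRowsFrom cs t

lemma pvAltStep_eq (cs : List Char) (t : Nat) :
    pvAltStep cs (pvRowsFrom cs t) ((cs.length - (t + 1) : Nat) : Int) = pvRowsFrom cs (t + 1) := by
  simp only [pvAltStep, pvRowsFrom, pvRowFor, PySem.List.insert_zero, PySem.List.pyGetD_zero]
  congr 1
  rw [PySem.List.pyRange_zero_nat, List.map_map]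
  congr 1
  apply List.map_congr_left
  intro b _
  have h2 : ((b : Int) + 1) = ((b + 1 : Nat) : Int) := by push_cast; ring
  simp only [Function.comp_apply, PySem.List.pyGetD_natCast, h2]

lemma pvBuild_eq (cs : List Char) : ∀ a : Nat, a ≤ cs.length →
    (PySem.List.pyRange ((a : Int) - 1) (-1) (-1)).foldl (pvAltStep cs)
      (pvRowsFrom cs (cs.length - a)) = pvRowsFrom cs cs.length := by
  intro a
  induction a with
  | zero => intro _; simp [PySem.List.pyRange_neg_one_eq_nil]
  | succ a ih =>
    intro ha
    have hc : ((a + 1 : Nat) : Int) - 1 = (a : Int) := by push_cast; ring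
    rw [hc, PySem.List.pyRange_neg_one_cons (by omega)]
    simp only [List.foldl_cons]
    have hs := pvAltStep_eq cs (cs.length - (a + 1))
    rw [show cs.length - (cs.length - (a + 1) + 1) = a from by omega] at hs
    rw [show cs.length - (a + 1) + 1 = cs.length - a from by omega] at hs
    rw [hs]
    exact ih (by omega)

lemma pvRows_entry (cs : List Char) : ∀ t : Nat, t ≤ cs.length → ∀ a b : Nat,
    cs.length - t ≤ a → a ≤ cs.length → b ≤ cs.length →
    ((pvRowsFrom cs t).getD (a - (cs.length - t)) []).getD b 0 = (pvLcp cs a b : Int) := by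
  intro t
  induction t with
  | zero =>
    intro _ a b h1 h2 h3
    have ha : a = cs.length := by omega
    subst ha
    rw [pvLcp, dif_neg (by omega)]
    simp [pvRowsFrom, List.getD, List.getElem?_replicate]
    split <;> rfl
  | succ t ih =>
    intro ht a b h1 h2 h3
    by_cases hae : a = cs.length - (t + 1)
    · subst hae
      have hidx : cs.length - (t + 1) - (cs.length - (t + 1)) = 0 := by omega
      rw [pvRowsFrom, hidx]
      simp only [List.getD_cons_zero]
      have ha' : cs.length - (t + 1) < cs.length := by omega
      rcases Nat.lt_or_ge b cs.length with hb | hb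
      · -- b < cs.length: the mapped part of the row
        have hrow : (pvRowFor cs (cs.length - (t + 1)) ((pvRowsFrom cs t).getD 0 [])).getD b 0 =
            if cs.getD (cs.length - (t + 1)) ' ' = cs.getD b ' '
            then ((pvRowsFrom cs t).getD 0 []).getD (b + 1) 0 + 1 else 0 := by
          unfold pvRowFor
          rw [List.getD, List.getElem?_append_left (by simpa using hb), List.getElem?_map,
            List.getElem?_range hb]
          simp
        rw [hrow, pvLcp, dif_pos ⟨ha', hb⟩]
        rw [List.getD_eq_getElem cs ' ' ha', List.getD_eq_getElem cs ' ' hb]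
        by_cases hc : cs[cs.length - (t + 1)]'ha' = cs[b]'hb
        · rw [if_pos hc, if_pos hc]
          have hprev := ih (by omega) (cs.length - t) (b + 1) (by omega) (by omega) (by omega)
          rw [show cs.length - t - (cs.length - t) = 0 from by omega] at hprev
          rw [show cs.length - (t + 1) + 1 = cs.length - t from by omega, hprev]
          push_cast
          ring
        · rw [if_neg hc, if_neg hc]
          simp
      · -- b = cs.length: the appended 0
        have hbe : b = cs.length := by omega
        subst hbe
        rw [pvLcp, dif_neg (by omega)]
        unfold pvRowFor
        rw [List.getD, List.getElem?_append_right (by simp)]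
        simp
    · have hidx : a - (cs.length - (t + 1)) = (a - (cs.length - t)) + 1 := by omega
      rw [pvRowsFrom, hidx]
      simp only [List.getD_cons_succ]
      exact ih (by omega) a b (by omega) h2 h3

lemma pvLcp_ge_iff (cs : List Char) : ∀ (t a b : Nat), a + t ≤ cs.length → b + t ≤ cs.length →
    (t ≤ pvLcp cs a b ↔ List.take t (List.drop a cs) = List.take t (List.drop b cs)) := by
  intro t
  induction t with
  | zero => intro a b _ _; simp
  | succ t ih =>
    intro a b ha hb
    have ha' : a < cs.length := by omega
    have hb' : b < cs.length := by omega
    rw [pvLcp]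
    rw [dif_pos ⟨ha', hb'⟩]
    rw [List.drop_eq_getElem_cons ha', List.drop_eq_getElem_cons hb']
    simp only [List.take_succ_cons, List.cons.injEq]
    by_cases hc : cs[a] = cs[b]
    · rw [if_pos hc]
      constructor
      · intro h; exact ⟨hc, (ih (a+1) (b+1) (by omega) (by omega)).mp (by omega)⟩
      · intro ⟨_, h2⟩
        have := (ih (a+1) (b+1) (by omega) (by omega)).mpr h2
        omega
    · rw [if_neg hc]
      constructor
      · intro h; omega
      · intro ⟨h1, _⟩; exact absurd h1 hc

-- ===== VERDICT (by name: the statement is the Claim_ definition above) =====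
-- the two inner-loop bodies agree for in-range i, j once B's table is the functional table
lemma pvInner_eq (cs : List Char) (k ans i j : Int)
    (h0i : 0 ≤ i) (hin : i < (cs.length : Int)) (h0j : 0 ≤ j) (hji : j < i + 1) :
    (let len1 : Int := ((PySem.List.slice cs (some j) (some (i + 1))).length : Int)
     let len2 : Int := ((PySem.List.slice cs (some (i + 1)) none).length : Int)
     let minn : Int := min len1 len2
     if PySem.List.slice cs (some j) (some (j + minn)) =
        PySem.List.slice cs (some (i + 1)) (some (i + 1 + minn)) then
       if minn = len1 then max ans (len1 * 2)
       else if k + len2 ≥ len1 then max ans (len1 * 2)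
       else ans
     else ans) =
    (let len1 : Int := i + 1 - j
     let len2 : Int := (cs.length : Int) - i - 1
     let minn : Int := if len2 < len1 then len2 else len1
     if PySem.List.pyGetD (PySem.List.pyGetD (pvRowsFrom cs cs.length) j ([] : List Int)) (i + 1) 0 ≥ minn
        ∧ (len1 ≤ len2 ∨ k + len2 ≥ len1)
     then max ans (len1 * 2) else ans) := by
  have hi' : i = (i.toNat : Int) := (Int.toNat_of_nonneg h0i).symm
  have hj' : j = (j.toNat : Int) := (Int.toNat_of_nonneg h0j).symm
  set iN := i.toNat with hiN
  set jn := j.toNat with hjn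
  rw [hi', hj']
  have hinN : iN < cs.length := by omega
  have hjiN : jn ≤ iN := by omega
  have hplus : ((iN : Int) + 1) = ((iN + 1 : Nat) : Int) := by push_cast; ring
  rw [hplus]
  set mn : Nat := min (iN + 1 - jn) (cs.length - (iN + 1)) with hmn
  have hmn1 : mn ≤ iN + 1 - jn := Nat.min_le_left _ _
  have hmn2 : mn ≤ cs.length - (iN + 1) := Nat.min_le_right _ _
  have hmn3 : mn = iN + 1 - jn ∨ mn = cs.length - (iN + 1) := by
    rw [hmn, Nat.min_def]; split <;> simp
  have hlen1 : ((PySem.List.slice cs (some (jn : Int)) (some ((iN + 1 : Nat) : Int))).length : Int)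
      = ((iN + 1 : Nat) : Int) - (jn : Int) := by
    rw [PySem.List.length_slice, PySem.List.clampIdx_natCast, PySem.List.clampIdx_natCast]
    omega
  have hlen2 : ((PySem.List.slice cs (some ((iN + 1 : Nat) : Int)) none).length : Int)
      = (cs.length : Int) - (iN : Int) - 1 := by
    rw [PySem.List.slice_from cs (by omega)]
    simp
    omega
  simp only [hlen1, hlen2]
  have hminA : min (((iN + 1 : Nat) : Int) - (jn : Int)) ((cs.length : Int) - (iN : Int) - 1)
      = (mn : Int) := by
    rw [min_def]; split <;> omega
  have hminB : (if (cs.length : Int) - (iN : Int) - 1 < ((iN + 1 : Nat) : Int) - (jn : Int)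
      then (cs.length : Int) - (iN : Int) - 1 else ((iN + 1 : Nat) : Int) - (jn : Int))
      = (mn : Int) := by
    split <;> omega
  simp only [hminA, hminB]
  rw [PySem.List.slice_natCast_add cs jn mn, PySem.List.slice_natCast_add cs (iN + 1) mn]
  have hiff := pvLcp_ge_iff cs mn jn (iN + 1) (by omega) (by omega)
  have hlook : PySem.List.pyGetD (PySem.List.pyGetD (pvRowsFrom cs cs.length) ((jn : Nat) : Int)
      ([] : List Int)) ((iN + 1 : Nat) : Int) 0 = ((pvLcp cs jn (iN + 1) : Nat) : Int) := by
    rw [PySem.List.pyGetD_natCast, PySem.List.pyGetD_natCast]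
    have h := pvRows_entry cs cs.length le_rfl jn (iN + 1) (by omega) (by omega) (by omega)
    rw [show jn - (cs.length - cs.length) = jn from by omega] at h
    exact h
  rw [hlook]
  simp only [← hiff]
  split_ifs <;> first | rfl | omega

theorem find_max_tandem_repeat_length_spec : Claim_equal_find_max_tandem_repeat_length := by
  intro s k _
  unfold Spec_find_max_tandem_repeat_length find_max_tandem_repeat_length
    find_max_tandem_repeat_length_alt
  set cs := s.toList with hcs
  by_cases hk : k ≥ (cs.length : Int)
  · rw [if_pos hk, if_pos hk]
  · rw [if_neg hk, if_neg hk]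
    have hrows : (PySem.List.pyRange ((cs.length : Int) - 1) (-1) (-1)).foldl (pvAltStep cs)
        [List.replicate (cs.length + 1) (0 : Int)] = pvRowsFrom cs cs.length := by
      have h := pvBuild_eq cs cs.length le_rfl
      rw [Nat.sub_self] at h
      exact h
    rw [hrows]
    apply PySem.List.foldl_congr_mem
    intro ans i hi
    apply PySem.List.foldl_congr_mem
    intro ans2 j hj
    obtain ⟨h0i, hin⟩ := PySem.List.mem_pyRange_one.mp hi
    obtain ⟨h0j, hji⟩ := PySem.List.mem_pyRange_one.mp hj
    exact pvInner_eq cs k ans2 i j h0i hin h0j hji
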